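-- pv_equiv track=rewrite | github.com/gnawre31/CCPS109-109-Python-Problems | labs109.py | remove_after_kth
-- ===== SOURCE A (Python) =====
-- def remove_after_kth(items, k = 1):
--     d = {}
--     ans = []
--     for i in items:
--         d[i] = d.get(i, 0) + 1
--         if(d[i] <= k):
--             ans.append(i)
--     return ans
-- ===== SOURCE B (Python) =====
-- def remove_after_kth(items, k = 1):
--     # Staged group-and-merge: for each distinct value collect the indices of its
--     # first max(k,0) occurrences, merge all kept indices in sorted order, and
--     # read the answer off the original list.
--     xs = list(items)
--     kk = max(k, 0)
--     keep = []
--     for v in dict.fromkeys(xs):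
--         keep.extend([i for i, x in enumerate(xs) if x == v][:kk])
--     keep.sort()
--     return [xs[i] for i in keep]
-- ===== Notes on version B (the rewrite author's own statement) =====
-- stated objective: alternative
-- what changed: B replaces A's single on-line pass with a running-count dictionary by a staged group-and-merge: for each distinct value it collects the indices of that value's first max(k,0) occurrences, merges all kept indices with a sort, and maps them back to values.
import Mathlib
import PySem

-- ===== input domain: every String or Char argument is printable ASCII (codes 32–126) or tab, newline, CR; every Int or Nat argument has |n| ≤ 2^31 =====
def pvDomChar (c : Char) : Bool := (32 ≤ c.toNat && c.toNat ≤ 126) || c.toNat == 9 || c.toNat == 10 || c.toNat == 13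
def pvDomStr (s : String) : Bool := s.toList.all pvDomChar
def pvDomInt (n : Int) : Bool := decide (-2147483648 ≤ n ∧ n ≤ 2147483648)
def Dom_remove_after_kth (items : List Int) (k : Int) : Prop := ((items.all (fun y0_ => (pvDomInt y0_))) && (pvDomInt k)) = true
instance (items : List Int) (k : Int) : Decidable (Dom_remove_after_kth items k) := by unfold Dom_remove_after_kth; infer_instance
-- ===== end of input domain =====

-- B groups indices by distinct value (first max(k,0) occurrences each), merges them by sorting,
-- and reads the answer off the list — a staged alternative to A's single counting pass.

-- ===== PORT A =====
-- d[i] = d.get(i, 0) + 1; if d[i] <= k: ans.append(i)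
def remove_after_kth (items : List Int) (k : Int) : List Int :=
  (items.foldl
    (fun (st : PySem.Dict Int Int × List Int) i =>
      if (st.1.insert i (st.1.getD i 0 + 1)).getD i 0 ≤ k
      then (st.1.insert i (st.1.getD i 0 + 1), st.2 ++ [i])
      else (st.1.insert i (st.1.getD i 0 + 1), st.2))
    (PySem.Dict.empty, [])).2

-- ===== PORT B =====
-- for v in dict.fromkeys(xs): keep.extend([i for i, x in enumerate(xs) if x == v][:kk]); keep.sort();
-- return [xs[i] for i in keep]  — every i in keep comes from enumerate(xs), so xs[i] cannot raise;
-- ported with pyGetD (default 0, never used).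
def remove_after_kth_alt (items : List Int) (k : Int) : List Int :=
  let kk := max k 0
  let keep := (PySem.List.dedup items).foldl
    (fun keep v =>
      keep ++ PySem.List.slice (((PySem.List.enumerate items 0).filter (fun p => p.2 == v)).map Prod.fst) none (some kk))
    []
  (PySem.List.sorted keep (fun i => i) false).map (fun i => PySem.List.pyGetD items i 0)

-- ===== PRECONDITION & SPEC =====
def Spec_remove_after_kth (items : List Int) (k : Int) (out : List Int) : Prop := out = remove_after_kth_alt items k
instance (items : List Int) (k : Int) (out : List Int) : Decidable (Spec_remove_after_kth items k out) := by unfold Spec_remove_after_kth; infer_instance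

-- ===== CLAIM (what is proved, stated in full; the proofs are below) =====
def Claim_equal_remove_after_kth : Prop := ∀ (items : List Int) (k : Int), Dom_remove_after_kth items k → Spec_remove_after_kth items k (remove_after_kth items k)

-- ===== LEMMAS AND PROOFS =====

-- kn: the number of occurrences kept per value, as a Nat.
def pvKn (k : Int) : Nat := (max k 0).toNat

theorem pvCountLt (k : Int) (c : Nat) : ((c : Int) < k) ↔ c < pvKn k := by
  unfold pvKn; omega

-- indices < n holding value v
def pvOcc (xs : List Int) (n : Nat) (v : Int) : List Nat :=
  (List.range n).filter (fun i => xs.getD i 0 == v)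

-- indices that A/B keep: prefix count of own value below kn
def pvKept (xs : List Int) (k : Int) : List Nat :=
  (List.range xs.length).filter (fun i => decide ((xs.take i).count (xs.getD i 0) < pvKn k))

theorem pvOcc_length (xs : List Int) (v : Int) :
    ∀ n, n ≤ xs.length → (pvOcc xs n v).length = (xs.take n).count v := by
  intro n
  induction n with
  | zero => simp [pvOcc]
  | succ m ih =>
    intro h
    have hm : m < xs.length := by omega
    have ih' := ih (by omega)
    unfold pvOcc at ih' ⊢
    rw [List.range_succ, List.filter_append, List.length_append, ih',
        List.take_add_one, List.count_append]
    have hg : xs[m]? = some xs[m] := List.getElem?_eq_getElem hm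
    rw [hg]
    by_cases hv : xs[m] = v
    · simp [hg, hv]
    · simp [hg, hv]

theorem pvOcc_take (xs : List Int) (k : Int) (v : Int) :
    ∀ n, n ≤ xs.length → (pvOcc xs n v).take (pvKn k) =
      (List.range n).filter (fun i => xs.getD i 0 == v && decide ((xs.take i).count v < pvKn k)) := by
  intro n
  induction n with
  | zero => simp [pvOcc]
  | succ m ih =>
    intro h
    have hm : m ≤ xs.length := by omega
    unfold pvOcc
    rw [List.range_succ, List.filter_append, List.take_append, List.filter_append]
    have hm' : m < xs.length := by omega
    have hlen := pvOcc_length xs v m hm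
    unfold pvOcc at hlen ih
    rw [ih hm]
    congr 1
    have hg : xs[m]? = some xs[m] := List.getElem?_eq_getElem hm'
    rw [hlen]
    by_cases hv : xs[m] = v
    · by_cases hc : (xs.take m).count v < pvKn k
      · have h1 : 1 ≤ pvKn k - (xs.take m).count v := by omega
        simp [hg, hv, hc, List.take_of_length_le, h1]
      · have h0 : pvKn k - (xs.take m).count v = 0 := by omega
        simp [hg, hv, hc, h0]
    · simp [hg, hv]

-- disjoint filters concatenate to the filter of the disjunction (up to permutation)
theorem pvFilter_or_perm {α : Type} (L : List α) (p q : α → Bool) (hdis : ∀ x, ¬(p x = true ∧ q x = true)) :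
    (L.filter p ++ L.filter q).Perm (L.filter (fun x => p x || q x)) := by
  induction L with
  | nil => simp
  | cons x L ih =>
    by_cases hp : p x = true
    · have hq : q x = false := by
        by_cases h : q x = true
        · exact absurd ⟨hp, h⟩ (hdis x)
        · simpa using h
      simpa [List.filter_cons, hp, hq] using ih.cons x
    · have hp' : p x = false := by simpa using hp
      by_cases hq : q x = true
      · simp only [List.filter_cons, hp', hq, Bool.or_true]
        exact (List.perm_middle).trans (ih.cons x)
      · have hq' : q x = false := by simpa using hq
        simpa [List.filter_cons, hp', hq'] using ih

theorem pvFlatMap_perm {α : Type} (L : List α) (f : α → Int) (Q : α → Bool) :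
    ∀ (vs : List Int), vs.Nodup →
      (vs.flatMap (fun v => L.filter (fun x => f x == v && Q x))).Perm
        (L.filter (fun x => decide (f x ∈ vs) && Q x)) := by
  intro vs
  induction vs with
  | nil => simp
  | cons v vs ih =>
    intro hnd
    rw [List.nodup_cons] at hnd
    rw [List.flatMap_cons]
    refine ((ih hnd.2).append_left _).trans ?_
    refine (pvFilter_or_perm L _ _ ?_).trans ?_
    · intro x ⟨h1, h2⟩
      simp only [Bool.and_eq_true, beq_iff_eq, decide_eq_true_eq] at h1 h2
      exact hnd.1 (h1.1 ▸ h2.1)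
    · apply List.Perm.of_eq
      apply List.filter_congr
      intro x _
      by_cases hf : f x = v <;> by_cases hm : f x ∈ vs <;> simp [hf, hm]

-- the invariant linking A's dictionary pass to the recursive prefix-count form
def pvKeepRec (k : Int) : List Int → List Int → List Int
  | _, [] => []
  | p, x :: xs =>
    if ((p.count x : Int)) < k then x :: pvKeepRec k (p ++ [x]) xs
    else pvKeepRec k (p ++ [x]) xs

theorem pvA_eq_keepRec (k : Int) :
    ∀ (l p : List Int) (d : PySem.Dict Int Int) (acc : List Int),
      (∀ v, d.getD v 0 = (p.count v : Int)) →
      (l.foldl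
        (fun (st : PySem.Dict Int Int × List Int) i =>
          if (st.1.insert i (st.1.getD i 0 + 1)).getD i 0 ≤ k
          then (st.1.insert i (st.1.getD i 0 + 1), st.2 ++ [i])
          else (st.1.insert i (st.1.getD i 0 + 1), st.2))
        (d, acc)).2 = acc ++ pvKeepRec k p l := by
  intro l
  induction l with
  | nil => intro p d acc _; simp [pvKeepRec]
  | cons x xs ih =>
    intro p d acc hd
    simp only [List.foldl_cons, hd]
    rw [PySem.Dict.getD_insert_self]
    have hd' : ∀ v, (d.insert x ((p.count x : Int) + 1)).getD v 0 = ((p ++ [x]).count v : Int) := by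
      intro v
      rw [PySem.Dict.getD_insert, hd]
      by_cases hvx : v = x
      · simp [hvx]
      · simp [hvx, Ne.symm hvx]
    unfold pvKeepRec
    by_cases hc : (p.count x : Int) < k
    · rw [if_pos (by omega), if_pos hc, ih (p ++ [x]) _ (acc ++ [x]) hd']
      simp
    · rw [if_neg (by omega), if_neg hc, ih (p ++ [x]) _ acc hd']

theorem pvKeepRec_eq (k : Int) (xs : List Int) :
    ∀ (l p : List Int), xs = p ++ l →
      pvKeepRec k p l =
        ((List.range l.length).filter
          (fun j => decide ((xs.take (p.length + j)).count (l.getD j 0) < pvKn k))).map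
          (fun j => l.getD j 0) := by
  intro l
  induction l with
  | nil => intro p _; simp [pvKeepRec]
  | cons x l ih =>
    intro p hxs
    have hx : xs = (p ++ [x]) ++ l := by simp [hxs]
    have ihx := ih (p ++ [x]) hx
    unfold pvKeepRec
    rw [List.length_cons, List.range_succ_eq_map, List.filter_cons, List.filter_map]
    have h0 : xs.take (p.length + 0) = p := by rw [hxs, Nat.add_zero, List.take_left]
    have hcond : decide ((xs.take (p.length + 0)).count ((x :: l).getD 0 0) < pvKn k) =
        decide ((p.count x : Int) < k) := by
      rw [h0, List.getD_cons_zero, decide_eq_decide]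
      exact (pvCountLt k (p.count x)).symm
    rw [hcond]
    have htail : (List.map (fun j => (x :: l).getD j 0)
        (List.map Nat.succ
          (List.filter
            ((fun j => decide ((xs.take (p.length + j)).count ((x :: l).getD j 0) < pvKn k)) ∘ Nat.succ)
            (List.range l.length)))) = pvKeepRec k (p ++ [x]) l := by
      rw [List.map_map, ihx]
      have hidx : ∀ j : Nat, p.length + (j + 1) = (p ++ [x]).length + j := by
        intro j; simp; omega
      have hfil : ((fun j => decide ((xs.take (p.length + j)).count ((x :: l).getD j 0) < pvKn k)) ∘ Nat.succ) =
          (fun j => decide ((xs.take ((p ++ [x]).length + j)).count (l.getD j 0) < pvKn k)) := by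
        funext j
        simp only [Function.comp_apply, List.getD_cons_succ, Nat.succ_eq_add_one, hidx j]
      rw [hfil]
      apply List.map_congr_left
      intro j _
      simp [Function.comp]
    by_cases hc : (p.count x : Int) < k
    · rw [if_pos hc, if_pos (by simp [hc])]
      rw [List.map_cons, List.getD_cons_zero, htail]
    · rw [if_neg hc, if_neg (by simp [hc]), htail]

theorem pvA_eq_kept (xs : List Int) (k : Int) :
    remove_after_kth xs k = (pvKept xs k).map (fun i => xs.getD i 0) := by
  unfold remove_after_kth
  rw [pvA_eq_keepRec k xs [] PySem.Dict.empty [] (by intro v; simp [PySem.Dict.getD_empty]),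
      pvKeepRec_eq k xs xs [] (by simp)]
  simp [pvKept]

-- B's per-value index list is (pvOcc …).take kn, cast to Int
theorem pvB_group (xs : List Int) (k : Int) (v : Int) :
    PySem.List.slice (((PySem.List.enumerate xs 0).filter (fun p => p.2 == v)).map Prod.fst) none (some (max k 0)) =
      ((pvOcc xs xs.length v).take (pvKn k)).map (fun (i : Nat) => (i : Int)) := by
  have hmax : max k 0 = ((pvKn k : Nat) : Int) := by unfold pvKn; omega
  rw [hmax, PySem.List.slice_to_natCast]
  rw [PySem.List.enumerate_eq_map_pyRange xs (0 : Int), PySem.List.len_eq, PySem.List.pyRange_zero_nat]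
  rw [List.map_map, List.filter_map, List.map_map]
  have hg : (Prod.fst ∘ (fun j => (j, PySem.List.pyGetD xs j (0 : Int))) ∘ (fun (i : Nat) => (i : Int))) =
      (fun (i : Nat) => (i : Int)) := rfl
  rw [hg, ← List.map_take]
  congr 2
  unfold pvOcc
  apply List.filter_congr
  intro i _
  simp [Function.comp, PySem.List.pyGetD_natCast]

theorem pvKept_pairwise (xs : List Int) (k : Int) : (pvKept xs k).Pairwise (· < ·) :=
  (List.pairwise_lt_range).filter _

theorem pvB_eq_kept (xs : List Int) (k : Int) :
    remove_after_kth_alt xs k = (pvKept xs k).map (fun i => xs.getD i 0) := by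
  simp only [remove_after_kth_alt]
  rw [PySem.List.foldl_append_eq_flatMap]
  have hgroups : (PySem.List.dedup xs).flatMap
      (fun v => PySem.List.slice (((PySem.List.enumerate xs 0).filter (fun p => p.2 == v)).map Prod.fst) none (some (max k 0))) =
      ((PySem.List.dedup xs).flatMap (fun v =>
        (List.range xs.length).filter
          (fun i => xs.getD i 0 == v && decide ((xs.take i).count (xs.getD i 0) < pvKn k)))).map
        (fun (i : Nat) => (i : Int)) := by
    rw [List.map_flatMap]
    apply List.flatMap_congr
    intro v _
    rw [pvB_group, pvOcc_take xs k v xs.length le_rfl]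
    congr 1
    apply List.filter_congr
    intro i _
    cases h : (xs[i]?.getD 0 == v) with
    | false => simp [h]
    | true => simp [beq_iff_eq.mp h]
  have hfilter : (List.range xs.length).filter
      (fun i => decide (xs.getD i 0 ∈ PySem.List.dedup xs) &&
        decide ((xs.take i).count (xs.getD i 0) < pvKn k)) = pvKept xs k := by
    unfold pvKept
    apply List.filter_congr
    intro i hi
    have hi' : i < xs.length := List.mem_range.mp hi
    have hmem : xs[i]?.getD 0 ∈ xs := by
      simp [List.getElem?_eq_getElem hi', List.getElem_mem]
    simp [hmem]
  have hperm : ((pvKept xs k).map (fun (i : Nat) => (i : Int))).Perm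
      (([] : List Int) ++ (PySem.List.dedup xs).flatMap
        (fun v => PySem.List.slice (((PySem.List.enumerate xs 0).filter (fun p => p.2 == v)).map Prod.fst) none (some (max k 0)))) := by
    rw [List.nil_append, hgroups]
    exact (List.Perm.map _ ((pvFlatMap_perm (List.range xs.length) (fun i => xs.getD i 0)
      (fun i => decide ((xs.take i).count (xs.getD i 0) < pvKn k)) (PySem.List.dedup xs)
      (PySem.List.nodup_dedup xs)).trans (List.Perm.of_eq hfilter))).symm
  have hpair : ((pvKept xs k).map (fun (i : Nat) => (i : Int))).Pairwise (· < ·) := by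
    refine List.Pairwise.map _ ?_ (pvKept_pairwise xs k)
    intro a b h; exact_mod_cast h
  rw [PySem.List.sorted_eq_of_perm_of_pairwise_lt _ _ _ hperm hpair]
  rw [List.map_map]
  apply List.map_congr_left
  intro i _
  simp [PySem.List.pyGetD_natCast]

-- ===== VERDICT (by name: the statement is the Claim_ definition above) =====
theorem remove_after_kth_spec : Claim_equal_remove_after_kth := by
  intro items k _
  unfold Spec_remove_after_kth
  rw [pvA_eq_kept, pvB_eq_kept]
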